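-- pv_equiv track=rewrite | github.com/chrishadley1983/discord-messenger | instagram/scripts/06_compile_outputs.py | compile_travel
-- ===== SOURCE A (Python) =====
-- from collections import defaultdict
--
-- def safe_get(d: dict, *keys, default=""):
--     """Safely get a nested value."""
--     for k in keys:
--         if isinstance(d, dict):
--             d = d.get(k, default)
--         else:
--             return default
--     return d if d is not None else default
--
-- def compile_travel(posts: list[dict]) -> str:
--     lines = [
--         "# Travel Guide",
--         "",
--         f"*{len(posts)} saved travel posts, organised by destination.*",
--         "",
--         "---",
--         "",
--     ]
--
--     # Group: country → city → category
--     tree: dict[str, dict[str, dict[str, list]]] = defaultdict(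
--         lambda: defaultdict(lambda: defaultdict(list))
--     )
--
--     for p in posts:
--         country = safe_get(p, "country", default="Unknown Country")
--         city = safe_get(p, "city_or_region", default="Unknown Location")
--         cat = safe_get(p, "category", default="general")
--         tree[country][city][cat].append(p)
--
--     for country in sorted(tree.keys()):
--         lines.append(f"## {country}")
--         lines.append("")
--
--         for city in sorted(tree[country].keys()):
--             lines.append(f"### {city}")
--             lines.append("")
--
--             for cat in sorted(tree[country][city].keys()):
--                 cat_posts = tree[country][city][cat]
--                 cat_label = cat.replace("_", " ").title()
--                 lines.append(f"#### {cat_label}")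
--                 lines.append("")
--
--                 for p in cat_posts:
--                     summary = safe_get(p, "one_line_summary", default="")
--                     location = safe_get(p, "specific_location", default="")
--                     cost = safe_get(p, "estimated_cost_level", default="")
--                     time = safe_get(p, "best_time_to_visit", default="")
--                     username = safe_get(p, "_username")
--                     url = safe_get(p, "_url")
--
--                     lines.append(f"- **{summary or 'Untitled'}**")
--                     if location:
--                         lines.append(f"  - Location: {location}")
--                     if cost:
--                         lines.append(f"  - Cost: {cost}")
--                     if time:
--                         lines.append(f"  - Best time: {time}")
--                     lines.append(f"  - Source: [@{username}]({url})")
--                     lines.append("")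
--
--         lines.append("---")
--         lines.append("")
--
--     return "\n".join(lines)
-- ===== SOURCE B (Python) =====
-- def compile_travel(posts: list[dict]) -> str:
--     # No nested defaultdict tree: key each post once, then walk sorted distinct
--     # keys per level, selecting posts by filtering (groups keep input order).
--     def sg(p, k, default=""):
--         v = p.get(k, default)
--         return v if v is not None else default
--
--     def post_lines(p):
--         summary = sg(p, "one_line_summary")
--         out = [f"- **{summary or 'Untitled'}**"]
--         location = sg(p, "specific_location")
--         if location:
--             out.append(f"  - Location: {location}")
--         cost = sg(p, "estimated_cost_level")
--         if cost:
--             out.append(f"  - Cost: {cost}")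
--         time = sg(p, "best_time_to_visit")
--         if time:
--             out.append(f"  - Best time: {time}")
--         out.append(f"  - Source: [@{sg(p, '_username')}]({sg(p, '_url')})")
--         out.append("")
--         return out
--
--     keyed = [
--         (
--             (
--                 sg(p, "country", "Unknown Country"),
--                 sg(p, "city_or_region", "Unknown Location"),
--                 sg(p, "category", "general"),
--             ),
--             p,
--         )
--         for p in posts
--     ]
--
--     lines = [
--         "# Travel Guide",
--         "",
--         f"*{len(posts)} saved travel posts, organised by destination.*",
--         "",
--         "---",
--         "",
--     ]
--
--     for country in sorted({k[0] for k, _ in keyed}):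
--         lines += [f"## {country}", ""]
--         in_country = [kp for kp in keyed if kp[0][0] == country]
--         for city in sorted({k[1] for k, _ in in_country}):
--             lines += [f"### {city}", ""]
--             in_city = [kp for kp in in_country if kp[0][1] == city]
--             for cat in sorted({k[2] for k, _ in in_city}):
--                 lines += [f"#### {cat.replace('_', ' ').title()}", ""]
--                 for k, p in in_city:
--                     if k[2] == cat:
--                         lines += post_lines(p)
--         lines += ["---", ""]
--     return "\n".join(lines)
-- ===== Notes on version B (the rewrite author's own statement) =====
-- stated objective: alternative
-- what changed: Replaces A's nested defaultdict tree built in a grouping pass by keying each post once, then walking the sorted distinct keys at each level and selecting each country/city/category group by filtering the keyed list, so no dict is ever built.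
import Mathlib
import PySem

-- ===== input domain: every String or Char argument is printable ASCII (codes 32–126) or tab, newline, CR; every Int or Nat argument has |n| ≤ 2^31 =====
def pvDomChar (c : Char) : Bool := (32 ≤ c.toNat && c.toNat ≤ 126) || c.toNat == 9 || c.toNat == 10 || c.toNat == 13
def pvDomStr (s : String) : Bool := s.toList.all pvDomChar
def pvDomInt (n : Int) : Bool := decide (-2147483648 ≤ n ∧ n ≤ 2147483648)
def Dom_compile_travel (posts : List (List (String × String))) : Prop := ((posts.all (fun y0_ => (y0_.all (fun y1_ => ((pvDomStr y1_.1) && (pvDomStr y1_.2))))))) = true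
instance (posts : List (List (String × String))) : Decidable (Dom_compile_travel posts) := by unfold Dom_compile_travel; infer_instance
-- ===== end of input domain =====

-- B replaces A's nested defaultdict grouping pass by keying each post once and walking
-- sorted distinct keys per level, selecting each group by filtering (objective: alternative).

-- ===== shared primitive helpers (used by both ports) =====

-- d.get(k, default): the Python dict is the pair list with later duplicates overwriting
def pvGet (p : List (String × String)) (k d0 : String) : String :=
  (PySem.Dict.update PySem.Dict.empty p).getD k d0

-- str.title(), hand-ported (exact on ASCII: cased chars are exactly the letters):
-- a letter is uppercased when it does not follow a letter, lowercased otherwise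
def pvTitleGo : Bool → List Char → List Char
  | _, [] => []
  | prev, c :: cs =>
    if PySem.Chars.isalpha c then
      (if prev then PySem.Chars.lowerChar c else PySem.Chars.upperChar c) :: pvTitleGo true cs
    else c :: pvTitleGo false cs

def pvTitle (s : String) : String := String.ofList (pvTitleGo false s.toList)

-- the three safe_get group keys (same defaults in A and B)
def pvKeyC (p : List (String × String)) : String := pvGet p "country" "Unknown Country"
def pvKeyCi (p : List (String × String)) : String := pvGet p "city_or_region" "Unknown Location"
def pvKeyCat (p : List (String × String)) : String := pvGet p "category" "general"

-- ===== PORT A =====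
def compile_travel (posts : List (List (String × String))) : String :=
  let lines0 : List String :=
    ["# Travel Guide", "",
     "*" ++ PySem.Int.toStr (posts.length : Int) ++ " saved travel posts, organised by destination.*",
     "", "---", ""]
  -- tree[country][city][cat].append(p) on nested defaultdicts
  let tree : PySem.Dict String (PySem.Dict String (PySem.Dict String (List (List (String × String))))) :=
    posts.foldl (fun t p =>
      t.modify (pvKeyC p) PySem.Dict.empty (fun d1 =>
        d1.modify (pvKeyCi p) PySem.Dict.empty (fun d2 =>
          d2.modify (pvKeyCat p) [] (fun l => l ++ [p])))) PySem.Dict.empty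
  let lines := (PySem.List.sorted tree.keys (fun x => x) false).foldl (fun ls country =>
      let ls := ls ++ ["## " ++ country, ""]
      let ls := (PySem.List.sorted (tree.getD country PySem.Dict.empty).keys (fun x => x) false).foldl
          (fun ls city =>
            let ls := ls ++ ["### " ++ city, ""]
            (PySem.List.sorted ((tree.getD country PySem.Dict.empty).getD city PySem.Dict.empty).keys
                (fun x => x) false).foldl
              (fun ls cat =>
                let catPosts := ((tree.getD country PySem.Dict.empty).getD city PySem.Dict.empty).getD cat []
                let ls := ls ++ ["#### " ++ pvTitle (PySem.Str.replace cat "_" " "), ""]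
                catPosts.foldl (fun ls p =>
                  let summary := pvGet p "one_line_summary" ""
                  let location := pvGet p "specific_location" ""
                  let cost := pvGet p "estimated_cost_level" ""
                  let time := pvGet p "best_time_to_visit" ""
                  let username := pvGet p "_username" ""
                  let url := pvGet p "_url" ""
                  let ls := ls ++ ["- **" ++ (if summary == "" then "Untitled" else summary) ++ "**"]
                  let ls := if location == "" then ls else ls ++ ["  - Location: " ++ location]
                  let ls := if cost == "" then ls else ls ++ ["  - Cost: " ++ cost]
                  let ls := if time == "" then ls else ls ++ ["  - Best time: " ++ time]
                  ls ++ ["  - Source: [@" ++ username ++ "](" ++ url ++ ")", ""]) ls) ls) ls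
      ls ++ ["---", ""]) lines0
  PySem.Str.join "\n" lines

-- ===== PORT B =====
-- detail lines of one post (B's post_lines helper)
def pvPostLines (p : List (String × String)) : List String :=
  let summary := pvGet p "one_line_summary" ""
  let location := pvGet p "specific_location" ""
  let cost := pvGet p "estimated_cost_level" ""
  let time := pvGet p "best_time_to_visit" ""
  ["- **" ++ (if summary == "" then "Untitled" else summary) ++ "**"]
    ++ (if location == "" then [] else ["  - Location: " ++ location])
    ++ (if cost == "" then [] else ["  - Cost: " ++ cost])
    ++ (if time == "" then [] else ["  - Best time: " ++ time])
    ++ ["  - Source: [@" ++ pvGet p "_username" "" ++ "](" ++ pvGet p "_url" "" ++ ")", ""]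

def compile_travel_alt (posts : List (List (String × String))) : String :=
  let keyed := posts.map (fun p => ((pvKeyC p, pvKeyCi p, pvKeyCat p), p))
  let lines0 : List String :=
    ["# Travel Guide", "",
     "*" ++ PySem.Int.toStr (posts.length : Int) ++ " saved travel posts, organised by destination.*",
     "", "---", ""]
  let lines := (PySem.List.sorted (PySem.Set.ofList (keyed.map (fun kp => kp.1.1)))
      (fun x => x) false).foldl (fun ls country =>
      let ls := ls ++ ["## " ++ country, ""]
      let inCountry := keyed.filter (fun kp => kp.1.1 == country)
      let ls := (PySem.List.sorted (PySem.Set.ofList (inCountry.map (fun kp => kp.1.2.1)))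
          (fun x => x) false).foldl (fun ls city =>
          let ls := ls ++ ["### " ++ city, ""]
          let inCity := inCountry.filter (fun kp => kp.1.2.1 == city)
          (PySem.List.sorted (PySem.Set.ofList (inCity.map (fun kp => kp.1.2.2)))
              (fun x => x) false).foldl (fun ls cat =>
              inCity.foldl (fun ls kp => if kp.1.2.2 == cat then ls ++ pvPostLines kp.2 else ls)
                (ls ++ ["#### " ++ pvTitle (PySem.Str.replace cat "_" " "), ""])) ls) ls
      ls ++ ["---", ""]) lines0
  PySem.Str.join "\n" lines

-- ===== PRECONDITION & SPEC =====
def Spec_compile_travel (posts : List (List (String × String))) (out : String) : Prop := out = compile_travel_alt posts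
instance (posts : List (List (String × String))) (out : String) : Decidable (Spec_compile_travel posts out) := by unfold Spec_compile_travel; infer_instance

-- ===== CLAIM (what is proved, stated in full; the proofs are below) =====
def Claim_equal_compile_travel : Prop := ∀ (posts : List (List (String × String))), Dom_compile_travel posts → Spec_compile_travel posts (compile_travel posts)

-- ===== LEMMAS AND PROOFS =====

-- looking up one key in the grouping fold gives the fold over the matching inputs
theorem pv_getD_group {α ν : Type} (l : List α) (key : α → String) (d0 : ν)
    (f : α → ν → ν) (d : PySem.Dict String ν) (c : String) :
    (l.foldl (fun t p => t.modify (key p) d0 (f p)) d).getD c d0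
      = (l.filter (fun p => key p == c)).foldl (fun v p => f p v) (d.getD c d0) := by
  induction l generalizing d with
  | nil => rfl
  | cons p l ih =>
    simp only [List.foldl_cons, List.filter_cons]
    rw [ih]
    rw [PySem.Dict.getD_modify]
    by_cases h : key p = c
    · simp [h]
    · rw [if_neg (fun hc => h hc.symm)]
      simp [h]

-- conditional-append loop = flatMap over the filtered list
theorem pv_foldl_if_flatMap {α β : Type} (q : α → Bool) (g : α → List β)
    (l : List α) (acc : List β) :
    l.foldl (fun a x => if q x then a ++ g x else a) acc
      = acc ++ (l.filter q).flatMap g := by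
  induction l generalizing acc with
  | nil => simp
  | cons x l ih =>
    simp only [List.foldl_cons, List.filter_cons]
    by_cases h : q x <;> simp [h, ih, List.append_assoc]

-- pointwise-equal bodies give equal folds
theorem pv_foldl_ext {α β : Type} (f g : β → α → β) (l : List α) (i : β)
    (h : ∀ b a, f b a = g b a) : l.foldl f i = l.foldl g i := by
  have : f = g := funext fun b => funext fun a => h b a
  rw [this]

-- ---- proof-side abbreviations (definitionally equal to subterms of the ports) ----

def pvPair (p : List (String × String)) : (String × String × String) × List (String × String) :=
  ((pvKeyC p, pvKeyCi p, pvKeyCat p), p)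

def pvG1 (posts : List (List (String × String))) (c : String) : List (List (String × String)) :=
  posts.filter (fun p => pvKeyC p == c)
def pvG2 (posts : List (List (String × String))) (c ci : String) : List (List (String × String)) :=
  (pvG1 posts c).filter (fun p => pvKeyCi p == ci)
def pvG3 (posts : List (List (String × String))) (c ci cat : String) : List (List (String × String)) :=
  (pvG2 posts c ci).filter (fun p => pvKeyCat p == cat)

def pvTree3 (l : List (List (String × String))) :
    PySem.Dict String (List (List (String × String))) :=
  l.foldl (fun d2 p => d2.modify (pvKeyCat p) [] (fun m => m ++ [p])) PySem.Dict.empty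

def pvTree2 (l : List (List (String × String))) :
    PySem.Dict String (PySem.Dict String (List (List (String × String)))) :=
  l.foldl (fun d1 p => d1.modify (pvKeyCi p) PySem.Dict.empty
    (fun d2 => d2.modify (pvKeyCat p) [] (fun m => m ++ [p]))) PySem.Dict.empty

def pvTree (posts : List (List (String × String))) :
    PySem.Dict String (PySem.Dict String (PySem.Dict String (List (List (String × String))))) :=
  posts.foldl (fun t p =>
    t.modify (pvKeyC p) PySem.Dict.empty (fun d1 =>
      d1.modify (pvKeyCi p) PySem.Dict.empty (fun d2 =>
        d2.modify (pvKeyCat p) [] (fun m => m ++ [p])))) PySem.Dict.empty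

def pvHeader (posts : List (List (String × String))) : List String :=
  ["# Travel Guide", "",
   "*" ++ PySem.Int.toStr (posts.length : Int) ++ " saved travel posts, organised by destination.*",
   "", "---", ""]

def pvBodyA (ls : List String) (p : List (String × String)) : List String :=
  let summary := pvGet p "one_line_summary" ""
  let location := pvGet p "specific_location" ""
  let cost := pvGet p "estimated_cost_level" ""
  let time := pvGet p "best_time_to_visit" ""
  let username := pvGet p "_username" ""
  let url := pvGet p "_url" ""
  let ls := ls ++ ["- **" ++ (if summary == "" then "Untitled" else summary) ++ "**"]
  let ls := if location == "" then ls else ls ++ ["  - Location: " ++ location]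
  let ls := if cost == "" then ls else ls ++ ["  - Cost: " ++ cost]
  let ls := if time == "" then ls else ls ++ ["  - Best time: " ++ time]
  ls ++ ["  - Source: [@" ++ username ++ "](" ++ url ++ ")", ""]

def pvLinesA (posts : List (List (String × String))) : List String :=
  (PySem.List.sorted (pvTree posts).keys (fun x => x) false).foldl (fun ls country =>
      let ls := ls ++ ["## " ++ country, ""]
      let ls := (PySem.List.sorted ((pvTree posts).getD country PySem.Dict.empty).keys (fun x => x) false).foldl
          (fun ls city =>
            let ls := ls ++ ["### " ++ city, ""]
            (PySem.List.sorted (((pvTree posts).getD country PySem.Dict.empty).getD city PySem.Dict.empty).keys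
                (fun x => x) false).foldl
              (fun ls cat =>
                let catPosts := (((pvTree posts).getD country PySem.Dict.empty).getD city PySem.Dict.empty).getD cat []
                let ls := ls ++ ["#### " ++ pvTitle (PySem.Str.replace cat "_" " "), ""]
                catPosts.foldl pvBodyA ls) ls) ls
      ls ++ ["---", ""]) (pvHeader posts)

def pvLinesB (posts : List (List (String × String))) : List String :=
  (PySem.List.sorted (PySem.Set.ofList ((posts.map pvPair).map (fun kp => kp.1.1)))
      (fun x => x) false).foldl (fun ls country =>
      let ls := ls ++ ["## " ++ country, ""]
      let inCountry := (posts.map pvPair).filter (fun kp => kp.1.1 == country)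
      let ls := (PySem.List.sorted (PySem.Set.ofList (inCountry.map (fun kp => kp.1.2.1)))
          (fun x => x) false).foldl (fun ls city =>
          let ls := ls ++ ["### " ++ city, ""]
          let inCity := inCountry.filter (fun kp => kp.1.2.1 == city)
          (PySem.List.sorted (PySem.Set.ofList (inCity.map (fun kp => kp.1.2.2)))
              (fun x => x) false).foldl (fun ls cat =>
              inCity.foldl (fun ls kp => if kp.1.2.2 == cat then ls ++ pvPostLines kp.2 else ls)
                (ls ++ ["#### " ++ pvTitle (PySem.Str.replace cat "_" " "), ""])) ls) ls
      ls ++ ["---", ""]) (pvHeader posts)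

-- ---- the canonical (group-by-filter) rendering both line lists are reduced to ----

def pvCatBlock (l : List (List (String × String))) (cat : String) : List String :=
  ["#### " ++ pvTitle (PySem.Str.replace cat "_" " "), ""]
    ++ (l.filter (fun p => pvKeyCat p == cat)).flatMap pvPostLines

def pvCityBlock (l : List (List (String × String))) (ci : String) : List String :=
  ["### " ++ ci, ""]
    ++ (PySem.List.sorted (PySem.Set.ofList ((l.filter (fun p => pvKeyCi p == ci)).map pvKeyCat))
        (fun x => x) false).flatMap (pvCatBlock (l.filter (fun p => pvKeyCi p == ci)))

def pvCountryBlock (posts : List (List (String × String))) (c : String) : List String :=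
  ["## " ++ c, ""]
    ++ (PySem.List.sorted (PySem.Set.ofList ((pvG1 posts c).map pvKeyCi))
        (fun x => x) false).flatMap (pvCityBlock (pvG1 posts c))
    ++ ["---", ""]

def pvLines (posts : List (List (String × String))) : List String :=
  pvHeader posts
    ++ (PySem.List.sorted (PySem.Set.ofList (posts.map pvKeyC))
        (fun x => x) false).flatMap (pvCountryBlock posts)

-- ---- A-side structure lemmas ----

theorem pvT1 (posts : List (List (String × String))) (c : String) :
    (pvTree posts).getD c PySem.Dict.empty = pvTree2 (pvG1 posts c) :=
  pv_getD_group posts pvKeyC PySem.Dict.empty _ PySem.Dict.empty c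

theorem pvT2 (posts : List (List (String × String))) (c ci : String) :
    ((pvTree posts).getD c PySem.Dict.empty).getD ci PySem.Dict.empty = pvTree3 (pvG2 posts c ci) := by
  rw [pvT1]
  exact pv_getD_group (pvG1 posts c) pvKeyCi PySem.Dict.empty _ PySem.Dict.empty ci

theorem pvT3 (posts : List (List (String × String))) (c ci cat : String) :
    (((pvTree posts).getD c PySem.Dict.empty).getD ci PySem.Dict.empty).getD cat [] = pvG3 posts c ci cat := by
  rw [pvT2]
  unfold pvTree3
  rw [pv_getD_group (pvG2 posts c ci) pvKeyCat [] (fun p m => m ++ [p]) PySem.Dict.empty cat]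
  exact PySem.List.foldl_append_singleton _ _

theorem pvK1 (posts : List (List (String × String))) :
    (pvTree posts).keys = PySem.Set.ofList (posts.map pvKeyC) :=
  PySem.Dict.keys_foldl_modify_key posts pvKeyC PySem.Dict.empty _ PySem.Dict.empty

theorem pvK2 (posts : List (List (String × String))) (c : String) :
    ((pvTree posts).getD c PySem.Dict.empty).keys = PySem.Set.ofList ((pvG1 posts c).map pvKeyCi) := by
  rw [pvT1]
  exact PySem.Dict.keys_foldl_modify_key (pvG1 posts c) pvKeyCi PySem.Dict.empty _ PySem.Dict.empty

theorem pvK3 (posts : List (List (String × String))) (c ci : String) :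
    (((pvTree posts).getD c PySem.Dict.empty).getD ci PySem.Dict.empty).keys
      = PySem.Set.ofList ((pvG2 posts c ci).map pvKeyCat) := by
  rw [pvT2]
  exact PySem.Dict.keys_foldl_modify_key (pvG2 posts c ci) pvKeyCat [] _ PySem.Dict.empty

theorem pvBodyA_eq (ls : List String) (p : List (String × String)) :
    pvBodyA ls p = ls ++ pvPostLines p := by
  simp only [pvBodyA, pvPostLines]
  split_ifs <;> simp [List.append_assoc]

theorem pvFoldA (l : List (List (String × String))) (ls : List String) :
    l.foldl pvBodyA ls = ls ++ l.flatMap pvPostLines := by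
  rw [pv_foldl_ext pvBodyA (fun ls p => ls ++ pvPostLines p) l ls pvBodyA_eq]
  exact PySem.List.foldl_append_eq_flatMap _ _ _

theorem pvA_canon (posts : List (List (String × String))) : pvLinesA posts = pvLines posts := by
  unfold pvLinesA pvLines
  rw [pvK1]
  rw [pv_foldl_ext _ (fun ls c => ls ++ pvCountryBlock posts c) _ _ ?_]
  · exact PySem.List.foldl_append_eq_flatMap _ _ _
  intro ls c
  simp only
  rw [pvK2]
  rw [pv_foldl_ext _ (fun ls ci => ls ++ pvCityBlock (pvG1 posts c) ci) _ _ ?_]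
  · rw [PySem.List.foldl_append_eq_flatMap]
    simp [pvCountryBlock, List.append_assoc]
  intro ls ci
  simp only
  rw [pvK3]
  rw [pv_foldl_ext _ (fun ls cat => ls ++ pvCatBlock (pvG2 posts c ci) cat) _ _ ?_]
  · rw [PySem.List.foldl_append_eq_flatMap]
    simp [pvCityBlock, pvG2, List.append_assoc]
  intro ls cat
  simp only
  rw [pvT3, pvFoldA]
  simp [pvCatBlock, pvG3, List.append_assoc]

-- ---- B-side structure lemmas ----

theorem pvBF1 (posts : List (List (String × String))) :
    (posts.map pvPair).map (fun kp => kp.1.1) = posts.map pvKeyC := by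
  simp [List.map_map, Function.comp, pvPair]

theorem pvBF2 (posts : List (List (String × String))) (c : String) :
    (posts.map pvPair).filter (fun kp => kp.1.1 == c) = (pvG1 posts c).map pvPair := by
  rw [List.filter_map]; rfl

theorem pvBF3 (posts : List (List (String × String))) (c ci : String) :
    ((pvG1 posts c).map pvPair).filter (fun kp => kp.1.2.1 == ci) = (pvG2 posts c ci).map pvPair := by
  rw [List.filter_map]; rfl

theorem pvBF4a (l : List (List (String × String))) :
    (l.map pvPair).map (fun kp => kp.1.2.1) = l.map pvKeyCi := by
  simp [List.map_map, Function.comp, pvPair]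

theorem pvBF4b (l : List (List (String × String))) :
    (l.map pvPair).map (fun kp => kp.1.2.2) = l.map pvKeyCat := by
  simp [List.map_map, Function.comp, pvPair]

theorem pvBF5 (l : List (List (String × String))) (cat : String) (init : List String) :
    (l.map pvPair).foldl (fun ls kp => if kp.1.2.2 == cat then ls ++ pvPostLines kp.2 else ls) init
      = init ++ (l.filter (fun p => pvKeyCat p == cat)).flatMap pvPostLines := by
  rw [List.foldl_map]
  exact pv_foldl_if_flatMap (fun p => pvKeyCat p == cat) pvPostLines l init

theorem pvB_canon (posts : List (List (String × String))) : pvLinesB posts = pvLines posts := by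
  unfold pvLinesB pvLines
  rw [pvBF1]
  rw [pv_foldl_ext _ (fun ls c => ls ++ pvCountryBlock posts c) _ _ ?_]
  · exact PySem.List.foldl_append_eq_flatMap _ _ _
  intro ls c
  simp only
  rw [pvBF2, pvBF4a]
  rw [pv_foldl_ext _ (fun ls ci => ls ++ pvCityBlock (pvG1 posts c) ci) _ _ ?_]
  · rw [PySem.List.foldl_append_eq_flatMap]
    simp [pvCountryBlock, List.append_assoc]
  intro ls ci
  simp only
  rw [pvBF3, pvBF4b]
  rw [pv_foldl_ext _ (fun ls cat => ls ++ pvCatBlock (pvG2 posts c ci) cat) _ _ ?_]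
  · rw [PySem.List.foldl_append_eq_flatMap]
    simp [pvCityBlock, pvG2, List.append_assoc]
  intro ls cat
  simp only
  rw [pvBF5]
  simp [pvCatBlock, pvG2, List.append_assoc]

-- ===== VERDICT (by name: the statement is the Claim_ definition above) =====
theorem compile_travel_spec : Claim_equal_compile_travel := by
  intro posts _
  show compile_travel posts = compile_travel_alt posts
  have ha : compile_travel posts = PySem.Str.join "\n" (pvLinesA posts) := rfl
  have hb : compile_travel_alt posts = PySem.Str.join "\n" (pvLinesB posts) := rfl
  rw [ha, hb, pvA_canon, pvB_canon]
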